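-- pv_equiv track=rewrite | github.com/mkhnuser/yp_algo_problems | sprint_8/g.py | find_all_pattern_occurrences
-- ===== SOURCE A (Python) =====
-- def find_pattern_occurrence(sequence, pattern, start):
--     if len(sequence) < len(pattern):
--         return -1
--
--     for pos in range(start, len(sequence) - len(pattern) + 1):
--         match = True
--         c = 0
--         for shift in range(len(pattern)):
--             s = sequence[pos + shift]
--             p = pattern[shift]
--
--             if shift == 0:
--                 c = abs(s - p)
--                 continue
--
--             if abs(s - p) != c:
--                 match = False
--                 break
--
--         if match:
--             return pos
--
--     return -1
--
-- def find_all_pattern_occurrences(sequence, pattern):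
--     occurrences = []
--     start = 0
--     while True:
--         occurrence = find_pattern_occurrence(sequence, pattern, start)
--         if occurrence == -1:
--             break
--         occurrences.append(occurrence)
--         start = occurrence + 1
--     return occurrences
-- ===== SOURCE B (Python) =====
-- def find_all_pattern_occurrences(sequence, pattern):
--     # Shift-major candidate pruning: start with every window start, then for each
--     # pattern shift i >= 1 make one pass that keeps only the candidates whose
--     # difference at shift i equals their difference at shift 0.
--     n, m = len(sequence), len(pattern)
--     candidates = list(range(n - m + 1))
--     for i in range(1, m):
--         candidates = [pos for pos in candidates
--                       if abs(sequence[pos + i] - pattern[i])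
--                          == abs(sequence[pos] - pattern[0])]
--     return candidates
-- ===== Notes on version B (the rewrite author's own statement) =====
-- stated objective: alternative
-- what changed: Replaced A's position-major scan (find-first helper plus restart-from-occurrence+1 while loop, each window checked element by element) by shift-major candidate pruning: start with all window starts and, for each pattern shift i>=1, one filtering pass keeps only candidates whose |seq-pattern| difference at shift i equals their difference at shift 0.
import Mathlib
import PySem

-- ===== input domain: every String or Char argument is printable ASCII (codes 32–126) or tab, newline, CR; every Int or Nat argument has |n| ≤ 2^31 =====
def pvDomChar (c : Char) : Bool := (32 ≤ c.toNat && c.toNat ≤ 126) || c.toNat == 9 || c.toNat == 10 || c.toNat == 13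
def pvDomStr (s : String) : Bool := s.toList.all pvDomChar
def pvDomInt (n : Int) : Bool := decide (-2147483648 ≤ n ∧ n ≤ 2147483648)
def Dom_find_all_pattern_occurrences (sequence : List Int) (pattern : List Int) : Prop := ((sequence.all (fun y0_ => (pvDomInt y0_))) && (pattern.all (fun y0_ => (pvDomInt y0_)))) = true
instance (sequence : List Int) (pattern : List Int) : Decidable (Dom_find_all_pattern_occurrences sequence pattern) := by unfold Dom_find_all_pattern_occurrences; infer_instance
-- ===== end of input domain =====

-- B replaces A's position-major scan with restart loop by shift-major pruning of a candidate list (objective: alternative).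

-- ===== PORT A =====
-- inner `for shift in range(len(pattern))` loop of find_pattern_occurrence;
-- list indices are always in range inside A's loops, so getD 0 is exact here
def pvGoA (sequence pattern : List Int) (pos : Nat) : List Nat → Int → Bool
  | [], _ => true
  | shift :: rest, c =>
    let s := sequence.getD (pos + shift) 0
    let p := pattern.getD shift 0
    if shift == 0 then pvGoA sequence pattern pos rest |s - p|
    else if |s - p| != c then false
    else pvGoA sequence pattern pos rest c

def pvCheckA (sequence pattern : List Int) (pos : Nat) : Bool :=
  pvGoA sequence pattern pos (List.range pattern.length) 0

-- outer `for pos in range(start, …)` loop with its early `return pos`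
def pvSearchA (sequence pattern : List Int) : List Nat → Int
  | [] => -1
  | pos :: rest =>
    if pvCheckA sequence pattern pos then (pos : Int)
    else pvSearchA sequence pattern rest

def find_pattern_occurrence (sequence pattern : List Int) (start : Nat) : Int :=
  if sequence.length < pattern.length then -1
  else pvSearchA sequence pattern
    (List.range' start (sequence.length - pattern.length + 1 - start))

-- used only by pvLoopA's termination proof
theorem pvSearchA_mem (sequence pattern : List Int) (l : List Nat) :
    pvSearchA sequence pattern l = -1 ∨ ∃ p ∈ l, pvSearchA sequence pattern l = (p : Int) := by
  induction l with
  | nil => left; rfl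
  | cons x rest ih =>
    by_cases h : pvCheckA sequence pattern x = true
    · right; exact ⟨x, by simp, by simp [pvSearchA, h]⟩
    · rcases ih with h1 | ⟨p, hp, h1⟩
      · left; simpa [pvSearchA, h] using h1
      · right; exact ⟨p, by simp [hp], by simpa [pvSearchA, h] using h1⟩

-- the `while True` restart loop of find_all_pattern_occurrences
def pvLoopA (sequence pattern : List Int) (start : Nat) : List Int :=
  if h : find_pattern_occurrence sequence pattern start = -1 then []
  else find_pattern_occurrence sequence pattern start ::
    pvLoopA sequence pattern ((find_pattern_occurrence sequence pattern start).toNat + 1)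
termination_by sequence.length + 1 - start
decreasing_by
  have := pvSearchA_mem sequence pattern
    (List.range' start (sequence.length - pattern.length + 1 - start))
  unfold find_pattern_occurrence at h
  split at h
  · simp at h
  · rename_i hlt
    rcases this with h1 | ⟨p, hp, h1⟩
    · exact absurd h1 h
    · have hfo : find_pattern_occurrence sequence pattern start = (p : Int) := by
        unfold find_pattern_occurrence
        rw [if_neg hlt]
        exact h1
      rw [hfo]
      have hm := List.mem_range'_1.mp hp
      simp only [Int.toNat_natCast]
      omega

def find_all_pattern_occurrences (sequence : List Int) (pattern : List Int) : List Int :=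
  pvLoopA sequence pattern 0

-- ===== PORT B =====
-- `range(n - m + 1)` is empty in Python when m > n; Nat `n + 1 - m` reproduces that exactly.
-- Candidates are kept as Nat positions (all Python positions are non-negative) and cast to
-- Int at the end; the indices pos+i, pos, i, 0 are always in range when the filter runs,
-- so getD 0 is exact here. range(1, m) → List.range' 1 (m - 1).
def find_all_pattern_occurrences_alt (sequence : List Int) (pattern : List Int) : List Int :=
  let n := sequence.length
  let m := pattern.length
  ((List.range' 1 (m - 1)).foldl
    (fun candidates i => candidates.filter (fun pos =>
      decide (|sequence.getD (pos + i) 0 - pattern.getD i 0| =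
              |sequence.getD pos 0 - pattern.getD 0 0|)))
    (List.range (n + 1 - m))).map (fun (p : Nat) => (p : Int))

-- ===== PRECONDITION & SPEC =====
def Spec_find_all_pattern_occurrences (sequence : List Int) (pattern : List Int) (out : List Int) : Prop := out = find_all_pattern_occurrences_alt sequence pattern
instance (sequence : List Int) (pattern : List Int) (out : List Int) : Decidable (Spec_find_all_pattern_occurrences sequence pattern out) := by unfold Spec_find_all_pattern_occurrences; infer_instance

-- ===== CLAIM (what is proved, stated in full; the proofs are below) =====
def Claim_equal_find_all_pattern_occurrences : Prop := ∀ (sequence : List Int) (pattern : List Int), Dom_find_all_pattern_occurrences sequence pattern → Spec_find_all_pattern_occurrences sequence pattern (find_all_pattern_occurrences sequence pattern)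

-- ===== LEMMAS AND PROOFS =====

-- B's per-shift condition at a window position
def pvCondB (sequence pattern : List Int) (i pos : Nat) : Bool :=
  decide (|sequence.getD (pos + i) 0 - pattern.getD i 0| =
          |sequence.getD pos 0 - pattern.getD 0 0|)

-- B's staged filters collapse to one filter with an `all` over the shifts
theorem foldl_filter_eq_filter_all (sequence pattern : List Int) (shifts : List Nat) :
    ∀ init : List Nat,
      shifts.foldl (fun candidates i => candidates.filter (fun pos =>
          decide (|sequence.getD (pos + i) 0 - pattern.getD i 0| =
                  |sequence.getD pos 0 - pattern.getD 0 0|))) init =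
        init.filter (fun pos => shifts.all (fun i => pvCondB sequence pattern i pos)) := by
  induction shifts with
  | nil => intro init; simp
  | cons i rest ih =>
    intro init
    simp only [List.foldl_cons, ih, List.filter_filter, List.all_cons]
    apply List.filter_congr
    intro x _
    simp [pvCondB, Bool.and_comm]

-- the port of B, written as one filter (definitional unfolding + the fold lemma)
theorem altB_eq (sequence pattern : List Int) :
    find_all_pattern_occurrences_alt sequence pattern =
      ((List.range (sequence.length + 1 - pattern.length)).filter
        (fun pos => (List.range' 1 (pattern.length - 1)).all
          (fun i => pvCondB sequence pattern i pos))).map (fun (p : Nat) => (p : Int)) :=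
  congrArg (List.map (fun (p : Nat) => (p : Int)))
    (foldl_filter_eq_filter_all sequence pattern (List.range' 1 (pattern.length - 1))
      (List.range (sequence.length + 1 - pattern.length)))

theorem goA_all (sequence pattern : List Int) (pos : Nat) (l : List Nat)
    (hl : ∀ x ∈ l, x ≠ 0) (c : Int) :
    pvGoA sequence pattern pos l c =
      l.all (fun s => decide (|sequence.getD (pos + s) 0 - pattern.getD s 0| = c)) := by
  induction l with
  | nil => rfl
  | cons x rest ih =>
    have hx : x ≠ 0 := hl x (by simp)
    by_cases heq : |sequence[pos + x]?.getD 0 - pattern[x]?.getD 0| = c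
    · simp [pvGoA, hx, heq, ih (fun y hy => hl y (by simp [hy]))]
    · simp [pvGoA, hx, heq]

theorem checkA_iff (sequence pattern : List Int) (pos : Nat) :
    pvCheckA sequence pattern pos = true ↔
      ∀ i < pattern.length,
        |sequence.getD (pos + i) 0 - pattern.getD i 0| =
          |sequence.getD pos 0 - pattern.getD 0 0| := by
  unfold pvCheckA
  rcases hm : pattern.length with _ | k
  · constructor
    · intro _ i hi
      omega
    · intro _
      rfl
  · rw [List.range_succ_eq_map]
    have h0 : pvGoA sequence pattern pos (0 :: (List.range k).map (· + 1)) 0 =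
        pvGoA sequence pattern pos ((List.range k).map (· + 1))
          |sequence.getD (pos + 0) 0 - pattern.getD 0 0| := by
      simp [pvGoA]
    rw [h0, goA_all sequence pattern pos _ (by simp)]
    simp only [List.all_map, List.all_eq_true, List.mem_range, Function.comp,
      decide_eq_true_eq]
    constructor
    · intro h i hi
      rcases Nat.eq_zero_or_pos i with rfl | hip
      · simp
      · have := h (i - 1) (by omega)
        have hi1 : i - 1 + 1 = i := by omega
        rw [hi1] at this
        simpa using this
    · intro h i hi
      simpa using h (i + 1) (by omega)

-- A's window check equals B's `all` over shifts 1..m-1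
theorem checkA_eq_allB (sequence pattern : List Int) (pos : Nat) :
    pvCheckA sequence pattern pos =
      (List.range' 1 (pattern.length - 1)).all (fun i => pvCondB sequence pattern i pos) := by
  rcases hA : pvCheckA sequence pattern pos with _ | _
  · symm
    rw [Bool.eq_false_iff]
    intro hall
    have : pvCheckA sequence pattern pos = true := by
      rw [checkA_iff]
      intro i hi
      rcases Nat.eq_zero_or_pos i with rfl | hip
      · simp
      · have hmem : i ∈ List.range' 1 (pattern.length - 1) :=
          List.mem_range'_1.mpr (by omega)
        have := List.all_eq_true.mp hall i hmem
        simpa [pvCondB] using this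
    rw [hA] at this; exact Bool.false_ne_true this
  · symm
    rw [List.all_eq_true]
    intro i hmem
    have hi := List.mem_range'_1.mp hmem
    have := (checkA_iff sequence pattern pos).mp hA i (by omega)
    simpa [pvCondB] using this

theorem loopA_filter (sequence pattern : List Int)
    (hnm : pattern.length ≤ sequence.length) (k : Nat) :
    ∀ start, sequence.length - pattern.length + 1 - start = k →
      pvLoopA sequence pattern start =
        ((List.range' start k).filter (pvCheckA sequence pattern)).map
          (fun (p : Nat) => (p : Int)) := by
  induction k with
  | zero =>
    intro start hk
    have hfind : find_pattern_occurrence sequence pattern start = -1 := by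
      unfold find_pattern_occurrence
      rw [if_neg (by omega), hk]
      rfl
    rw [pvLoopA.eq_def, dif_pos hfind]
    simp
  | succ k ih =>
    intro start hk
    have hrg : List.range' start (sequence.length - pattern.length + 1 - start) =
        start :: List.range' (start + 1) k := by
      rw [hk, List.range'_succ]
    by_cases hc : pvCheckA sequence pattern start = true
    · have hfind : find_pattern_occurrence sequence pattern start = (start : Int) := by
        unfold find_pattern_occurrence
        rw [if_neg (by omega), hrg]
        simp [pvSearchA, hc]
      rw [pvLoopA.eq_def, dif_neg (by rw [hfind]; omega)]
      simp only [hfind, Int.toNat_natCast]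
      rw [ih (start + 1) (by omega)]
      rw [List.range'_succ, List.filter_cons, if_pos hc]
      simp
    · have hfind : find_pattern_occurrence sequence pattern start =
          find_pattern_occurrence sequence pattern (start + 1) := by
        unfold find_pattern_occurrence
        rw [if_neg (by omega), if_neg (by omega), hrg]
        have h1 : sequence.length - pattern.length + 1 - (start + 1) = k := by omega
        rw [h1]
        simp [pvSearchA, hc]
      have hstep : pvLoopA sequence pattern start = pvLoopA sequence pattern (start + 1) := by
        conv_lhs => rw [pvLoopA.eq_def]
        conv_rhs => rw [pvLoopA.eq_def]
        rw [hfind]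
      rw [hstep, ih (start + 1) (by omega)]
      rw [List.range'_succ, List.filter_cons, if_neg (by simp [hc])]

-- ===== VERDICT (by name: the statement is the Claim_ definition above) =====
theorem find_all_pattern_occurrences_spec : Claim_equal_find_all_pattern_occurrences := by
  intro sequence pattern _
  unfold Spec_find_all_pattern_occurrences
  unfold find_all_pattern_occurrences
  rw [altB_eq]
  by_cases hnm : sequence.length < pattern.length
  · have hfind : find_pattern_occurrence sequence pattern 0 = -1 := by
      unfold find_pattern_occurrence
      rw [if_pos hnm]
    rw [pvLoopA.eq_def, dif_pos hfind]
    have h0 : sequence.length + 1 - pattern.length = 0 := by omega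
    simp [h0]
  · have hnm := Nat.le_of_not_lt hnm
    rw [loopA_filter sequence pattern hnm (sequence.length - pattern.length + 1) 0 (by omega)]
    have hk : sequence.length - pattern.length + 1 = sequence.length + 1 - pattern.length := by
      omega
    rw [hk, ← List.range_eq_range']
    refine congrArg (List.map (fun (p : Nat) => (p : Int))) (List.filter_congr ?_)
    intro pos _
    simpa [pvCondB] using checkA_eq_allB sequence pattern pos
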